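-- pv_equiv track=rewrite | github.com/dim273/t-pet | res/JudgeData/P63/gen.py | solve_bridge
-- ===== SOURCE A (Python) =====
-- def solve_bridge(L, positions):
--     """计算最小时间和最大时间"""
--     if not positions:
--         return 0, 0
--
--     min_time = 0
--     max_time = 0
--
--     for pos in positions:
--         # 每个士兵可以选择向左或向右
--         # 最小时间：选择离最近端点的时间
--         min_time = max(min_time, min(pos, L + 1 - pos))
--         # 最大时间：选择离最远端点的时间
--         max_time = max(max_time, max(pos, L + 1 - pos))
--
--     return min_time, max_time
-- ===== SOURCE B (Python) =====
-- def solve_bridge(L, positions):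
--     if not positions:
--         return 0, 0
--     m = L + 1
--     # distance of each soldier from the midpoint, doubled: min(p, m-p) = (m - |2p-m|)//2
--     # and max(p, m-p) = (m + |2p-m|)//2, so only the smallest and largest distance matter.
--     ds = sorted(abs(2 * p - m) for p in positions)
--     return max(0, (m - ds[0]) // 2), max(0, (m + ds[-1]) // 2)
-- ===== Notes on version B (the rewrite author's own statement) =====
-- stated objective: alternative
-- what changed: Instead of A's running maxima of min(p,L+1-p) and max(p,L+1-p), B maps each position to its doubled distance |2p-(L+1)| from the bridge midpoint, sorts these distances, and reads both answers in closed form from the smallest and largest distance: min_time = max(0,(L+1-ds[0])//2), max_time = max(0,(L+1+ds[-1])//2). (constant-factor speedup: the per-element work moves from an interpreted Python loop into C-level map/sorted builtins)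
import Mathlib
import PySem

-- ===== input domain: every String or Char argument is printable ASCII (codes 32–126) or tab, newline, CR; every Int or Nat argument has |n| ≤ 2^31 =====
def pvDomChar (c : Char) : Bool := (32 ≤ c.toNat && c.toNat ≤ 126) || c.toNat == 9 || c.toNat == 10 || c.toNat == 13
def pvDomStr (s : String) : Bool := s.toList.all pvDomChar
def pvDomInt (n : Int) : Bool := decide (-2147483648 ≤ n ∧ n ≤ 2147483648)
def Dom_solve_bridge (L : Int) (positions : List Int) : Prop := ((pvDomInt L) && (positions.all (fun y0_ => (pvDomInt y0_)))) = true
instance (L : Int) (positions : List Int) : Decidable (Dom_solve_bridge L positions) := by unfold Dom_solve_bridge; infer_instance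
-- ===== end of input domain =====

-- B replaces A's running maxima of min(p,L+1-p)/max(p,L+1-p) by sorting the doubled midpoint
-- distances |2p-(L+1)| and reading both answers in closed form from the smallest and largest
-- distance; objective: alternative decomposition.

-- ===== PORT A =====
def solve_bridge (L : Int) (positions : List Int) : Int × Int :=
  if positions = [] then (0, 0)
  else
    positions.foldl
      (fun (st : Int × Int) pos =>
        (max st.1 (min pos (L + 1 - pos)), max st.2 (max pos (L + 1 - pos))))
      (0, 0)

-- ===== PORT B =====
def solve_bridge_alt (L : Int) (positions : List Int) : Int × Int :=
  if positions = [] then (0, 0)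
  else
    let m := L + 1
    let ds := PySem.List.sorted (positions.map (fun p => |2 * p - m|)) (fun x => x)
    -- ds is nonempty here, so ds.headD 0 / ds.getLastD 0 are exactly Python's ds[0] / ds[-1]
    (max 0 (PySem.Int.floordiv (m - ds.headD 0) 2),
     max 0 (PySem.Int.floordiv (m + ds.getLastD 0) 2))

-- ===== PRECONDITION & SPEC =====
def Spec_solve_bridge (L : Int) (positions : List Int) (out : Int × Int) : Prop := out = solve_bridge_alt L positions
instance (L : Int) (positions : List Int) (out : Int × Int) : Decidable (Spec_solve_bridge L positions out) := by unfold Spec_solve_bridge; infer_instance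

-- ===== CLAIM (what is proved, stated in full; the proofs are below) =====
def Claim_equal_solve_bridge : Prop := ∀ (L : Int) (positions : List Int), Dom_solve_bridge L positions → Spec_solve_bridge L positions (solve_bridge L positions)

-- ===== LEMMAS AND PROOFS =====

-- A's paired fold splits into the two independent running-max folds.
theorem pv_pair_split (L : Int) (l : List Int) (a b : Int) :
    l.foldl
      (fun (st : Int × Int) pos =>
        (max st.1 (min pos (L + 1 - pos)), max st.2 (max pos (L + 1 - pos))))
      (a, b)
    = (l.foldl (fun s p => max s (min p (L + 1 - p))) a,
       l.foldl (fun s p => max s (max p (L + 1 - p))) b) := by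
  induction l generalizing a b with
  | nil => rfl
  | cons x t ih => simp only [List.foldl]; exact ih _ _

-- A running max seeded with 0 equals max 0 c when c is an upper bound belonging to the list.
theorem pv_fold_max_char (l : List Int) (c : Int) (hc : c ∈ l) (hb : ∀ x ∈ l, x ≤ c) :
    l.foldl max 0 = max 0 c := by
  refine le_antisymm ?_ ?_
  · rcases PySem.List.foldl_max_mem l 0 with h | h
    · rw [h]; exact le_max_left _ _
    · exact le_trans (hb _ h) (le_max_right _ _)
  · exact max_le (PySem.List.le_foldl_max l 0).1 ((PySem.List.le_foldl_max l 0).2 _ hc)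

-- In a ≤-sorted nonempty list, getLastD d is a member and an upper bound.
theorem pv_last_char (l : List Int) (h : l ≠ []) (hp : l.Pairwise (· ≤ ·)) (d : Int) :
    l.getLastD d ∈ l ∧ ∀ x ∈ l, x ≤ l.getLastD d := by
  induction l generalizing d with
  | nil => exact absurd rfl h
  | cons a t ih =>
    rw [List.getLastD_cons]
    cases t with
    | nil => exact ⟨List.mem_singleton.mpr rfl, by intro x hx; simp_all⟩
    | cons b t' =>
      obtain ⟨hm, hub⟩ := ih (List.cons_ne_nil _ _) hp.tail a
      refine ⟨List.mem_cons_of_mem _ hm, ?_⟩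
      intro x hx
      rcases List.mem_cons.mp hx with rfl | hx
      · exact le_trans (List.rel_of_pairwise_cons hp hm) (le_refl _)
      · exact hub _ hx

-- arithmetic bridges between min/max(p, m-p) and the doubled midpoint distance |2p-m|
theorem pv_min_arith (m p d : Int) (hd : |2 * p - m| = d) :
    min p (m - p) = PySem.Int.floordiv (m - d) 2 := by
  rw [PySem.Int.floordiv_eq_ediv_of_pos (by norm_num)]
  rcases abs_cases (2 * p - m) with ⟨he, _⟩ | ⟨he, _⟩ <;> omega

theorem pv_min_le_arith (m p d : Int) (hd : d ≤ |2 * p - m|) :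
    min p (m - p) ≤ PySem.Int.floordiv (m - d) 2 := by
  rw [PySem.Int.floordiv_eq_ediv_of_pos (by norm_num)]
  rcases abs_cases (2 * p - m) with ⟨he, _⟩ | ⟨he, _⟩ <;> omega

theorem pv_max_arith (m p d : Int) (hd : |2 * p - m| = d) :
    max p (m - p) = PySem.Int.floordiv (m + d) 2 := by
  rw [PySem.Int.floordiv_eq_ediv_of_pos (by norm_num)]
  rcases abs_cases (2 * p - m) with ⟨he, _⟩ | ⟨he, _⟩ <;> omega

theorem pv_max_le_arith (m p d : Int) (hd : |2 * p - m| ≤ d) :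
    max p (m - p) ≤ PySem.Int.floordiv (m + d) 2 := by
  rw [PySem.Int.floordiv_eq_ediv_of_pos (by norm_num)]
  rcases abs_cases (2 * p - m) with ⟨he, _⟩ | ⟨he, _⟩ <;> omega

-- A's min-time fold collapses to the closed form taken from the least doubled distance d0.
theorem pv_min_side (m : Int) (l : List Int) (d0 : Int)
    (hmem : d0 ∈ l.map (fun p => |2 * p - m|))
    (hlb : ∀ y ∈ l.map (fun p => |2 * p - m|), d0 ≤ y) :
    l.foldl (fun s p => max s (min p (m - p))) 0
      = max 0 (PySem.Int.floordiv (m - d0) 2) := by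
  rw [← List.foldl_map (f := fun p => min p (m - p)) (g := max)]
  apply pv_fold_max_char
  · obtain ⟨p, hp, hfp⟩ := List.mem_map.mp hmem
    exact List.mem_map.mpr ⟨p, hp, pv_min_arith m p d0 hfp⟩
  · intro x hx
    obtain ⟨p, hp, rfl⟩ := List.mem_map.mp hx
    exact pv_min_le_arith m p d0 (hlb _ (List.mem_map.mpr ⟨p, hp, rfl⟩))

-- A's max-time fold collapses to the closed form taken from the greatest doubled distance D.
theorem pv_max_side (m : Int) (l : List Int) (D : Int)
    (hmem : D ∈ l.map (fun p => |2 * p - m|))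
    (hub : ∀ y ∈ l.map (fun p => |2 * p - m|), y ≤ D) :
    l.foldl (fun s p => max s (max p (m - p))) 0
      = max 0 (PySem.Int.floordiv (m + D) 2) := by
  rw [← List.foldl_map (f := fun p => max p (m - p)) (g := max)]
  apply pv_fold_max_char
  · obtain ⟨p, hp, hfp⟩ := List.mem_map.mp hmem
    exact List.mem_map.mpr ⟨p, hp, pv_max_arith m p D hfp⟩
  · intro x hx
    obtain ⟨p, hp, rfl⟩ := List.mem_map.mp hx
    exact pv_max_le_arith m p D (hub _ (List.mem_map.mpr ⟨p, hp, rfl⟩))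

-- ===== VERDICT (by name: the statement is the Claim_ definition above) =====
theorem solve_bridge_spec : Claim_equal_solve_bridge := by
  intro L positions _
  unfold Spec_solve_bridge solve_bridge solve_bridge_alt
  cases positions with
  | nil => rfl
  | cons h t =>
    rw [if_neg (by simp), if_neg (by simp)]
    rw [pv_pair_split]
    simp only []
    set m := L + 1 with hm
    set ds := PySem.List.sorted ((h :: t).map (fun p => |2 * p - m|)) (fun x => x) with hds
    have hdsne : ds ≠ [] := by
      rw [hds]
      intro hc
      exact absurd ((PySem.List.sorted_eq_nil_iff _ _ _).mp hc) (by simp)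
    have hd : ds = ds.headD 0 :: ds.tail := by
      cases hcase : ds with
      | nil => exact absurd hcase hdsne
      | cons a b => rfl
    have hd0mem : ds.headD 0 ∈ (h :: t).map (fun p => |2 * p - m|) :=
      (PySem.List.mem_sorted _ _ _ _).mp (hds ▸ hd ▸ List.mem_cons_self)
    have hd0le : ∀ y ∈ (h :: t).map (fun p => |2 * p - m|), ds.headD 0 ≤ y := by
      have := PySem.List.key_head_sorted_le ((h :: t).map (fun p => |2 * p - m|))
        (fun x => x) (hds ▸ hd)
      simpa using this
    obtain ⟨hDmem', hDub'⟩ := pv_last_char ds hdsne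
      (by rw [hds]; exact PySem.List.sorted_pairwise _ _) 0
    have hDmem : ds.getLastD 0 ∈ (h :: t).map (fun p => |2 * p - m|) :=
      (PySem.List.mem_sorted _ _ _ _).mp (hds ▸ hDmem')
    have hDub : ∀ y ∈ (h :: t).map (fun p => |2 * p - m|), y ≤ ds.getLastD 0 := fun y hy =>
      hDub' _ ((hds ▸ PySem.List.mem_sorted _ _ _ _).mpr hy)
    exact Prod.ext (pv_min_side m (h :: t) _ hd0mem hd0le)
      (pv_max_side m (h :: t) _ hDmem hDub)
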